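-- pv_equiv track=rewrite | github.com/jKaleba/WDI | Z4/Z4.py | ex19KnightProduct
-- ===== SOURCE A (Python) =====
-- def ex19KnightProduct(data: list[list[int]], k: int) -> int:
--     n = len(data)
--
--     pairCounter = 0
--
--     for i in range(n - 2):
--
--         for j in range(n - 1):
--
--             # horizontal
--             if data[i][j] * data[i + 2][j + 1] == k:
--                 pairCounter += 1
--
--             if data[i + 2][j] * data[i][j + 1] == k:
--                 pairCounter += 1
--
--             # vertical
--             if data[j][i] * data[j + 1][i + 2] == k:
--                 pairCounter += 1
--
--             if data[j + 1][i] * data[j][i + 2] == k: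
--                 pairCounter += 1
--
--     return pairCounter
-- ===== SOURCE B (Python) =====
-- def ex19KnightProduct(data: list[list[int]], k: int) -> int:
--     n = len(data)
--     offsets = ((2, 1), (2, -1), (-2, 1), (-2, -1), (1, 2), (1, -2), (-1, 2), (-1, -2))
--     counter = 0
--     for r in range(n):
--         for c in range(n):
--             for dr, dc in offsets:
--                 nr, nc = r + dr, c + dc
--                 if 0 <= nr < n and 0 <= nc < n:
--                     if data[r][c] * data[nr][nc] == k:
--                         counter += 1
--     return counter // 2
-- ===== Notes on version B (the rewrite author's own statement) =====
-- stated objective: alternative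
-- what changed: Replaces A's four hand-unrolled pair checks over the index rectangle (n-2)x(n-1) by a uniform scan of every cell with the eight knight offsets (bounds-checked), counting each ordered pair once and returning counter // 2.
import Mathlib
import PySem

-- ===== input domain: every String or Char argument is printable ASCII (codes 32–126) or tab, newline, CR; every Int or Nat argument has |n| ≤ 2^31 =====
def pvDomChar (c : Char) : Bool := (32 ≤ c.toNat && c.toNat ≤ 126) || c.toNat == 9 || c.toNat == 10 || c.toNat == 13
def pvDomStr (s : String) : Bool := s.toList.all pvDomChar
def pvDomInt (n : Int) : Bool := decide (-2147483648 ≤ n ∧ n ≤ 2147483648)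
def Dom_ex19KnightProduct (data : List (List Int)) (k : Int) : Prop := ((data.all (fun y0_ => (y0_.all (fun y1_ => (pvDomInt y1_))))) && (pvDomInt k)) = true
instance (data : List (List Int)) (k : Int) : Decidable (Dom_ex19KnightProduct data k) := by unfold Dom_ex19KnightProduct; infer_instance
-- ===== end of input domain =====

-- B replaces A's four hand-unrolled checks over an (n-2)x(n-1) index rectangle by a uniform
-- bounds-checked scan of all cells with the eight knight offsets, returning counter // 2
-- (each unordered pair is seen from both endpoints); alternative decomposition, similar cost.


-- ===== PORT A =====
-- data[i][j] is ported as pyGetD; Pre_ below guarantees every access is in range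
-- (outside Pre_ the Python raises IndexError, which pyGetD's default never reaches).
def ex19KnightProduct (data : List (List Int)) (k : Int) : Int :=
  let n : Int := data.length
  (PySem.List.pyRange 0 (n - 2) 1).foldl (fun pc i =>
    (PySem.List.pyRange 0 (n - 1) 1).foldl (fun pc j =>
      -- horizontal
      let pc := if PySem.List.pyGetD (PySem.List.pyGetD data i []) j 0 *
                   PySem.List.pyGetD (PySem.List.pyGetD data (i + 2) []) (j + 1) 0 == k
                then pc + 1 else pc
      let pc := if PySem.List.pyGetD (PySem.List.pyGetD data (i + 2) []) j 0 *
                   PySem.List.pyGetD (PySem.List.pyGetD data i []) (j + 1) 0 == k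
                then pc + 1 else pc
      -- vertical
      let pc := if PySem.List.pyGetD (PySem.List.pyGetD data j []) i 0 *
                   PySem.List.pyGetD (PySem.List.pyGetD data (j + 1) []) (i + 2) 0 == k
                then pc + 1 else pc
      let pc := if PySem.List.pyGetD (PySem.List.pyGetD data (j + 1) []) i 0 *
                   PySem.List.pyGetD (PySem.List.pyGetD data j []) (i + 2) 0 == k
                then pc + 1 else pc
      pc) pc) 0

-- ===== PORT B =====
def ex19KnightProduct_alt (data : List (List Int)) (k : Int) : Int :=
  let n : Int := data.length
  let offsets : List (Int × Int) := [(2, 1), (2, -1), (-2, 1), (-2, -1), (1, 2), (1, -2), (-1, 2), (-1, -2)]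
  let counter :=
    (PySem.List.pyRange 0 n 1).foldl (fun counter r =>
      (PySem.List.pyRange 0 n 1).foldl (fun counter c =>
        offsets.foldl (fun counter o =>
          let nr := r + o.1
          let nc := c + o.2
          if 0 ≤ nr ∧ nr < n ∧ 0 ≤ nc ∧ nc < n then
            if PySem.List.pyGetD (PySem.List.pyGetD data r []) c 0 *
               PySem.List.pyGetD (PySem.List.pyGetD data nr []) nc 0 == k
            then counter + 1 else counter
          else counter) counter) counter) 0
  PySem.Int.floordiv counter 2

-- ===== PRECONDITION & SPEC =====
-- Pre_ excludes exactly the inputs on which the Python A raises IndexError: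
-- grids with 3 or more rows in which some row is shorter than the number of rows.
def Pre_ex19KnightProduct (data : List (List Int)) (k : Int) : Prop :=
  data.length ≤ 2 ∨ ∀ row ∈ data, data.length ≤ row.length
instance (data : List (List Int)) (k : Int) : Decidable (Pre_ex19KnightProduct data k) := by
  unfold Pre_ex19KnightProduct; infer_instance

def pvWitness_ex19KnightProduct : List (List Int) × Int :=
  ([[1, 2, 3], [4, 5, 6], [7, 8, 9]], 8)

def Spec_ex19KnightProduct (data : List (List Int)) (k : Int) (out : Int) : Prop := out = ex19KnightProduct_alt data k
instance (data : List (List Int)) (k : Int) (out : Int) : Decidable (Spec_ex19KnightProduct data k out) := by unfold Spec_ex19KnightProduct; infer_instance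

-- ===== CLAIM (what is proved, stated in full; the proofs are below) =====
def Claim_equal_ex19KnightProduct : Prop := ∀ (data : List (List Int)) (k : Int), Dom_ex19KnightProduct data k → Pre_ex19KnightProduct data k → Spec_ex19KnightProduct data k (ex19KnightProduct data k)

-- ===== LEMMAS AND PROOFS =====

-- grid lookup with Int indices, as both ports write it
def pvCell (data : List (List Int)) (r c : Int) : Int :=
  PySem.List.pyGetD (PySem.List.pyGetD data r []) c 0

-- A's summand for a pair (i, j) of the index rectangle
def pvTA (data : List (List Int)) (k : Int) (i j : ℕ) : Int :=
  (if pvCell data i j * pvCell data (i + 2) (j + 1) = k then 1 else 0) +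
  (if pvCell data (i + 2) j * pvCell data i (j + 1) = k then 1 else 0) +
  (if pvCell data j i * pvCell data (j + 1) (i + 2) = k then 1 else 0) +
  (if pvCell data (j + 1) i * pvCell data j (i + 2) = k then 1 else 0)

-- B's summand for one offset at cell (r, c)
def pvU (data : List (List Int)) (k : Int) (dr dc : Int) (r c : ℕ) : Int :=
  if (0 ≤ (r : Int) + dr ∧ (r : Int) + dr < (data.length : Int) ∧
      0 ≤ (c : Int) + dc ∧ (c : Int) + dc < (data.length : Int)) ∧
     pvCell data r c * pvCell data ((r : Int) + dr) ((c : Int) + dc) = k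
  then 1 else 0

lemma pv_ite_step (c : Prop) [Decidable c] (pc : Int) :
    (if c then pc + 1 else pc) = pc + (if c then 1 else 0) := by
  split <;> simp

lemma pv_ite_ite_step (g c : Prop) [Decidable g] [Decidable c] (pc : Int) :
    (if g then (if c then pc + 1 else pc) else pc) = pc + (if g ∧ c then 1 else 0) := by
  by_cases hg : g <;> by_cases hc : c <;> simp [hg, hc]

lemma pv_sum_map_range (n : ℕ) (f : ℕ → Int) :
    ((List.range n).map f).sum = ∑ i ∈ Finset.range n, f i := rfl

lemma pv_sum_shift1 (N : ℕ) (f : ℕ → Int) (h0 : f 0 = 0) :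
    ∑ r ∈ Finset.range N, f r = ∑ i ∈ Finset.range (N - 1), f (i + 1) := by
  match N with
  | 0 => simp
  | (m + 1) => rw [Finset.sum_range_succ']; simp [h0]

lemma pv_sum_shift2 (N : ℕ) (f : ℕ → Int) (h0 : f 0 = 0) (h1 : f 1 = 0) :
    ∑ r ∈ Finset.range N, f r = ∑ i ∈ Finset.range (N - 2), f (i + 2) := by
  match N with
  | 0 => simp
  | 1 => simp [h0]
  | (m + 2) =>
    rw [Finset.sum_range_succ', Finset.sum_range_succ']
    simp only [h0, h1, zero_add, add_zero]
    apply Finset.sum_congr rfl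
    intro i _
    congr 1

lemma pv_sum_restrict (N M : ℕ) (f : ℕ → Int) (hM : M ≤ N) (h : ∀ r, M ≤ r → f r = 0) :
    ∑ r ∈ Finset.range N, f r = ∑ r ∈ Finset.range M, f r :=
  Finset.eventually_constant_sum h hM

-- A's port as a double sum over the index rectangle
lemma pvA_eq (data : List (List Int)) (k : Int) :
    ex19KnightProduct data k =
      ∑ i ∈ Finset.range (data.length - 2), ∑ j ∈ Finset.range (data.length - 1),
        pvTA data k i j := by
  unfold ex19KnightProduct
  simp only [beq_iff_eq, pv_ite_step]
  simp only [add_assoc]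
  simp only [PySem.List.foldl_add]
  simp only [PySem.List.pyRange_one, sub_zero, List.map_map, zero_add]
  have h2 : ((data.length : Int) - 2).toNat = data.length - 2 := by omega
  have h1 : ((data.length : Int) - 1).toNat = data.length - 1 := by omega
  rw [h2, h1]
  simp only [pv_sum_map_range]
  unfold pvTA pvCell
  simp only [add_assoc, Function.comp_def]

-- B's port as (sum over all cells and the eight offsets) // 2
lemma pvB_eq (data : List (List Int)) (k : Int) :
    ex19KnightProduct_alt data k =
      PySem.Int.floordiv
        (∑ r ∈ Finset.range data.length, ∑ c ∈ Finset.range data.length,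
          (pvU data k 2 1 r c + pvU data k 2 (-1) r c + pvU data k (-2) 1 r c +
           pvU data k (-2) (-1) r c + pvU data k 1 2 r c + pvU data k 1 (-2) r c +
           pvU data k (-1) 2 r c + pvU data k (-1) (-2) r c)) 2 := by
  unfold ex19KnightProduct_alt
  simp only [List.foldl, beq_iff_eq, pv_ite_ite_step]
  simp only [add_assoc]
  simp only [PySem.List.foldl_add]
  simp only [PySem.List.pyRange_one, sub_zero, List.map_map, zero_add, Int.toNat_natCast]
  simp only [pv_sum_map_range]
  unfold pvU pvCell
  simp only [Function.comp_def]

-- one lemma per knight offset: B's guarded count over all cells equals one of A's four terms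
lemma pvS21 (data : List (List Int)) (k : Int) :
    ∑ r ∈ Finset.range data.length, ∑ c ∈ Finset.range data.length, pvU data k 2 1 r c =
    ∑ i ∈ Finset.range (data.length - 2), ∑ j ∈ Finset.range (data.length - 1),
      (if pvCell data i j * pvCell data ((i : Int) + 2) ((j : Int) + 1) = k then 1 else 0) := by
  rw [pv_sum_restrict data.length (data.length - 2) _ (by omega)
    (by intro r hr; apply Finset.sum_eq_zero; intro c _
        rw [pvU, if_neg]; rintro ⟨⟨_, h2, _⟩, -⟩; omega)]
  apply Finset.sum_congr rfl; intro i hi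
  rw [pv_sum_restrict data.length (data.length - 1) _ (by omega)
    (by intro c hc; rw [pvU, if_neg]; rintro ⟨⟨_, _, _, h4⟩, -⟩; omega)]
  apply Finset.sum_congr rfl; intro j hj
  simp only [Finset.mem_range] at hi hj
  have hG : (0 ≤ (i : Int) + 2 ∧ (i : Int) + 2 < (data.length : Int) ∧
      0 ≤ (j : Int) + 1 ∧ (j : Int) + 1 < (data.length : Int)) := by omega
  simp [pvU, hG]

lemma pvSm2m1 (data : List (List Int)) (k : Int) :
    ∑ r ∈ Finset.range data.length, ∑ c ∈ Finset.range data.length, pvU data k (-2) (-1) r c =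
    ∑ i ∈ Finset.range (data.length - 2), ∑ j ∈ Finset.range (data.length - 1),
      (if pvCell data i j * pvCell data ((i : Int) + 2) ((j : Int) + 1) = k then 1 else 0) := by
  rw [pv_sum_shift2 data.length _
    (by apply Finset.sum_eq_zero; intro c _; rw [pvU, if_neg]; rintro ⟨⟨h1, _⟩, -⟩; omega)
    (by apply Finset.sum_eq_zero; intro c _; rw [pvU, if_neg]; rintro ⟨⟨h1, _⟩, -⟩; omega)]
  apply Finset.sum_congr rfl; intro i hi
  rw [pv_sum_shift1 data.length _
    (by rw [pvU, if_neg]; rintro ⟨⟨_, _, h3, _⟩, -⟩; omega)]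
  apply Finset.sum_congr rfl; intro j hj
  simp only [Finset.mem_range] at hi hj
  have hij : i < data.length ∧ j < data.length := by omega
  simp [pvU, hij, mul_comm]

lemma pvSm21 (data : List (List Int)) (k : Int) :
    ∑ r ∈ Finset.range data.length, ∑ c ∈ Finset.range data.length, pvU data k (-2) 1 r c =
    ∑ i ∈ Finset.range (data.length - 2), ∑ j ∈ Finset.range (data.length - 1),
      (if pvCell data ((i : Int) + 2) j * pvCell data i ((j : Int) + 1) = k then 1 else 0) := by
  rw [pv_sum_shift2 data.length _
    (by apply Finset.sum_eq_zero; intro c _; rw [pvU, if_neg]; rintro ⟨⟨h1, _⟩, -⟩; omega)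
    (by apply Finset.sum_eq_zero; intro c _; rw [pvU, if_neg]; rintro ⟨⟨h1, _⟩, -⟩; omega)]
  apply Finset.sum_congr rfl; intro i hi
  rw [pv_sum_restrict data.length (data.length - 1) _ (by omega)
    (by intro c hc; rw [pvU, if_neg]; rintro ⟨⟨_, _, _, h4⟩, -⟩; omega)]
  apply Finset.sum_congr rfl; intro j hj
  simp only [Finset.mem_range] at hi hj
  have hij : i < data.length ∧ j + 1 < data.length := by omega
  have hZ : 0 ≤ (j : Int) + 1 ∧ (j : Int) + 1 < (data.length : Int) := by omega
  simp [pvU, hij, hZ, mul_comm]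

lemma pvS2m1 (data : List (List Int)) (k : Int) :
    ∑ r ∈ Finset.range data.length, ∑ c ∈ Finset.range data.length, pvU data k 2 (-1) r c =
    ∑ i ∈ Finset.range (data.length - 2), ∑ j ∈ Finset.range (data.length - 1),
      (if pvCell data ((i : Int) + 2) j * pvCell data i ((j : Int) + 1) = k then 1 else 0) := by
  rw [pv_sum_restrict data.length (data.length - 2) _ (by omega)
    (by intro r hr; apply Finset.sum_eq_zero; intro c _
        rw [pvU, if_neg]; rintro ⟨⟨_, h2, _⟩, -⟩; omega)]
  apply Finset.sum_congr rfl; intro i hi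
  rw [pv_sum_shift1 data.length _
    (by rw [pvU, if_neg]; rintro ⟨⟨_, _, h3, _⟩, -⟩; omega)]
  apply Finset.sum_congr rfl; intro j hj
  simp only [Finset.mem_range] at hi hj
  have hij : i + 2 < data.length ∧ j < data.length := by omega
  have hZ : 0 ≤ (i : Int) + 2 ∧ (i : Int) + 2 < (data.length : Int) := by omega
  simp [pvU, hij, hZ, mul_comm]

lemma pvS12 (data : List (List Int)) (k : Int) :
    ∑ r ∈ Finset.range data.length, ∑ c ∈ Finset.range data.length, pvU data k 1 2 r c =
    ∑ i ∈ Finset.range (data.length - 2), ∑ j ∈ Finset.range (data.length - 1),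
      (if pvCell data j i * pvCell data ((j : Int) + 1) ((i : Int) + 2) = k then 1 else 0) := by
  conv_lhs => rw [Finset.sum_comm]
  rw [pv_sum_restrict data.length (data.length - 2) _ (by omega)
    (by intro c hc; apply Finset.sum_eq_zero; intro r _
        rw [pvU, if_neg]; rintro ⟨⟨_, _, _, h4⟩, -⟩; omega)]
  apply Finset.sum_congr rfl; intro i hi
  rw [pv_sum_restrict data.length (data.length - 1) _ (by omega)
    (by intro r hr; rw [pvU, if_neg]; rintro ⟨⟨_, h2, _⟩, -⟩; omega)]
  apply Finset.sum_congr rfl; intro j hj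
  simp only [Finset.mem_range] at hi hj
  have hG : (0 ≤ (j : Int) + 1 ∧ (j : Int) + 1 < (data.length : Int) ∧
      0 ≤ (i : Int) + 2 ∧ (i : Int) + 2 < (data.length : Int)) := by omega
  simp [pvU, hG]

lemma pvSm1m2 (data : List (List Int)) (k : Int) :
    ∑ r ∈ Finset.range data.length, ∑ c ∈ Finset.range data.length, pvU data k (-1) (-2) r c =
    ∑ i ∈ Finset.range (data.length - 2), ∑ j ∈ Finset.range (data.length - 1),
      (if pvCell data j i * pvCell data ((j : Int) + 1) ((i : Int) + 2) = k then 1 else 0) := by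
  conv_lhs => rw [Finset.sum_comm]
  rw [pv_sum_shift2 data.length _
    (by apply Finset.sum_eq_zero; intro r _; rw [pvU, if_neg]; rintro ⟨⟨_, _, h3, _⟩, -⟩; omega)
    (by apply Finset.sum_eq_zero; intro r _; rw [pvU, if_neg]; rintro ⟨⟨_, _, h3, _⟩, -⟩; omega)]
  apply Finset.sum_congr rfl; intro i hi
  rw [pv_sum_shift1 data.length _
    (by rw [pvU, if_neg]; rintro ⟨⟨h1, _⟩, -⟩; omega)]
  apply Finset.sum_congr rfl; intro j hj
  simp only [Finset.mem_range] at hi hj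
  have hij : i < data.length ∧ j < data.length := by omega
  simp [pvU, hij, mul_comm]

lemma pvSm12 (data : List (List Int)) (k : Int) :
    ∑ r ∈ Finset.range data.length, ∑ c ∈ Finset.range data.length, pvU data k (-1) 2 r c =
    ∑ i ∈ Finset.range (data.length - 2), ∑ j ∈ Finset.range (data.length - 1),
      (if pvCell data ((j : Int) + 1) i * pvCell data j ((i : Int) + 2) = k then 1 else 0) := by
  conv_lhs => rw [Finset.sum_comm]
  rw [pv_sum_restrict data.length (data.length - 2) _ (by omega)
    (by intro c hc; apply Finset.sum_eq_zero; intro r _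
        rw [pvU, if_neg]; rintro ⟨⟨_, _, _, h4⟩, -⟩; omega)]
  apply Finset.sum_congr rfl; intro i hi
  rw [pv_sum_shift1 data.length _
    (by rw [pvU, if_neg]; rintro ⟨⟨h1, _⟩, -⟩; omega)]
  apply Finset.sum_congr rfl; intro j hj
  simp only [Finset.mem_range] at hi hj
  have hij : i < data.length ∧ j < data.length := by omega
  have hZ : 0 ≤ (i : Int) + 2 ∧ (i : Int) + 2 < (data.length : Int) := by omega
  simp [pvU, hij, hZ]

lemma pvS1m2 (data : List (List Int)) (k : Int) :
    ∑ r ∈ Finset.range data.length, ∑ c ∈ Finset.range data.length, pvU data k 1 (-2) r c =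
    ∑ i ∈ Finset.range (data.length - 2), ∑ j ∈ Finset.range (data.length - 1),
      (if pvCell data ((j : Int) + 1) i * pvCell data j ((i : Int) + 2) = k then 1 else 0) := by
  conv_lhs => rw [Finset.sum_comm]
  rw [pv_sum_shift2 data.length _
    (by apply Finset.sum_eq_zero; intro r _; rw [pvU, if_neg]; rintro ⟨⟨_, _, h3, _⟩, -⟩; omega)
    (by apply Finset.sum_eq_zero; intro r _; rw [pvU, if_neg]; rintro ⟨⟨_, _, h3, _⟩, -⟩; omega)]
  apply Finset.sum_congr rfl; intro i hi
  rw [pv_sum_restrict data.length (data.length - 1) _ (by omega)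
    (by intro r hr; rw [pvU, if_neg]; rintro ⟨⟨_, h2, _⟩, -⟩; omega)]
  apply Finset.sum_congr rfl; intro j hj
  simp only [Finset.mem_range] at hi hj
  have hij : i < data.length ∧ j + 1 < data.length := by omega
  have hZ : 0 ≤ (j : Int) + 1 ∧ (j : Int) + 1 < (data.length : Int) := by omega
  simp [pvU, hij, hZ, mul_comm]

-- the eight guarded counts sum to twice A's rectangle sum
lemma pv_double (data : List (List Int)) (k : Int) :
    (∑ r ∈ Finset.range data.length, ∑ c ∈ Finset.range data.length,
      (pvU data k 2 1 r c + pvU data k 2 (-1) r c + pvU data k (-2) 1 r c +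
       pvU data k (-2) (-1) r c + pvU data k 1 2 r c + pvU data k 1 (-2) r c +
       pvU data k (-1) 2 r c + pvU data k (-1) (-2) r c)) =
    2 * ∑ i ∈ Finset.range (data.length - 2), ∑ j ∈ Finset.range (data.length - 1),
        pvTA data k i j := by
  simp only [Finset.sum_add_distrib]
  rw [pvS21, pvS2m1, pvSm21, pvSm2m1, pvS12, pvS1m2, pvSm12, pvSm1m2]
  simp only [pvTA]
  simp only [Finset.sum_add_distrib]
  ring

-- ===== VERDICT (by name: the statement is the Claim_ definition above) =====
theorem ex19KnightProduct_spec : Claim_equal_ex19KnightProduct := by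
  intro data k _ _
  unfold Spec_ex19KnightProduct
  rw [pvA_eq, pvB_eq, pv_double, PySem.Int.floordiv_eq_ediv_of_pos (by norm_num)]
  exact (Int.mul_ediv_cancel_left _ (by norm_num)).symm
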